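-- pv_equiv track=rewrite | github.com/ClarenceJiang71/fastprep_prac | Amazon/min_sum_distance_warehouses.py | minSumDistancesToWarehouses
-- ===== SOURCE A (Python) =====
-- def minSumDistancesToWarehouses(dist_centers) -> int:
--     # edge case: we could just put the warehouses at the(dist_centers) center
--     if len(dist_centers) <= 2:
--         return 0
--
--     # sort
--     dist_centers.sort()
--     n = len(dist_centers)
--     min_val, max_val =dist_centers[0], dist_centers[-1]
--
--     # the two groups
--     first = []
--     second = []
--
--     # Group the distribution base on which extreme value it is close to
--     # Imagine this as you are dragging the 2 group to be as far as possible
--     # one to the left, which drags a value toward the min_val, and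
--     # ofc one to the right, which drags toward the max_Val
--     for i in range(n):
--         dist_to_min = abs(dist_centers[i] - min_val)
--         dist_to_max = abs(dist_centers[i] - max_val)
--
--         if dist_to_min < dist_to_max:
--             first.append(dist_centers[i])
--         else:
--             second.append(dist_centers[i])
--
--     # Find the medians of the clusters
--     median1 = first[len(first) // 2]
--     median2 = second[len(second) // 2]
--
--     res = 0
--     # Calculate the minimum sum of distances
--     for i in range(n):
--         res += min(abs(dist_centers[i] - median1), abs(dist_centers[i] - median2))
--
--     return res
-- ===== SOURCE B (Python) =====
-- def minSumDistancesToWarehouses(dist_centers) -> int: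
--     n = len(dist_centers)
--     if n <= 2:
--         return 0
--     mn = min(dist_centers)
--     mx = max(dist_centers)
--     if mn == mx:
--         # all centers coincide: both warehouses sit there, total distance 0
--         return 0
--     t = mn + mx
--     first = [x for x in dist_centers if 2 * x < t]
--     second = [x for x in dist_centers if 2 * x >= t]
--     m1 = _kth_smallest(first, len(first) // 2)
--     m2 = _kth_smallest(second, len(second) // 2)
--     return sum(min(abs(x - m1), abs(x - m2)) for x in dist_centers)
--
--
-- def _kth_smallest(xs, k):
--     # iterative quickselect (middle-element pivot): the 0-based k-th smallest of xs
--     while True: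
--         p = xs[len(xs) // 2]
--         lt = [x for x in xs if x < p]
--         if k < len(lt):
--             xs = lt
--             continue
--         eq = sum(1 for x in xs if x == p)
--         if k < len(lt) + eq:
--             return p
--         xs = [x for x in xs if x > p]
--         k -= len(lt) + eq
-- ===== Notes on version B (the rewrite author's own statement) =====
-- stated objective: alternative
-- what changed: B never sorts: it finds min/max in one pass, threshold-partitions the list (2*x < min+max), picks each group's upper median by iterative quickselect, and sums the min distances in one pass, replacing A's sort-then-group-then-index pipeline.
-- crash fix: On lists of length >= 3 whose elements are all equal, A raises IndexError (its first group is empty and it indexes into it); B returns 0, the cost of placing both warehouses at the common point. — e.g. on minSumDistancesToWarehouses([5, 5, 5]): A raises IndexError, B returns 0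
import Mathlib
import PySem

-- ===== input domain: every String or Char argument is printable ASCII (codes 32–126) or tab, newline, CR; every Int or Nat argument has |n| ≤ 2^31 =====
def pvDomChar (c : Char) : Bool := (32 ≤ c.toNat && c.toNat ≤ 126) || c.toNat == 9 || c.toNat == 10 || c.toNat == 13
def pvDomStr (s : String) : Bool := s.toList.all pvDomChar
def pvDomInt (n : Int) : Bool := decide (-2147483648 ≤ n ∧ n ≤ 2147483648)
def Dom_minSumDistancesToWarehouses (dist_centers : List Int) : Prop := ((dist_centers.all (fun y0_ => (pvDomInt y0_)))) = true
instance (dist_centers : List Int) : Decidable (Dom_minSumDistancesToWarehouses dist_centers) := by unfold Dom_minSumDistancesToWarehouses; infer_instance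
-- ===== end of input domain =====

-- B replaces A's sort-then-group pipeline by min/max + threshold partition + quickselect medians
-- (equivalence is about the RETURN value only: A sorts its argument in place, B does not mutate it).

-- ===== PORT A =====
def minSumDistancesToWarehouses (dist_centers : List Int) : Int :=
  if PySem.List.len dist_centers ≤ 2 then 0
  else
    -- dist_centers.sort() mutates in place; s is the list from here on
    let s := PySem.List.sorted dist_centers (fun x => x)
    let n := PySem.List.len s
    let min_val := PySem.List.pyGetD s 0 0
    let max_val := PySem.List.pyGetD s (-1) 0
    let fs := (PySem.List.pyRange 0 n 1).foldl (fun (acc : List Int × List Int) i =>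
        let x := PySem.List.pyGetD s i 0
        let dist_to_min := |x - min_val|
        let dist_to_max := |x - max_val|
        if dist_to_min < dist_to_max then (acc.1 ++ [x], acc.2) else (acc.1, acc.2 ++ [x]))
      ([], [])
    -- first[len(first)//2]: IndexError when first is empty — excluded by Pre_ (pyGetD default unused inside Pre_)
    let median1 := PySem.List.pyGetD fs.1 (PySem.Int.floordiv (PySem.List.len fs.1) 2) 0
    let median2 := PySem.List.pyGetD fs.2 (PySem.Int.floordiv (PySem.List.len fs.2) 2) 0
    (PySem.List.pyRange 0 n 1).foldl (fun res i =>
        let x := PySem.List.pyGetD s i 0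
        res + min |x - median1| |x - median2|) 0

-- ===== PORT B =====
-- the middle-element pivot xs[len(xs)//2] is a member of xs (cited by pvKth's termination proof)
lemma pvPivot_mem (x0 : Int) (rest : List Int) :
    (x0 :: rest).getD ((x0 :: rest).length / 2) 0 ∈ x0 :: rest := by
  rw [List.getD_eq_getElem _ _ (by simp only [List.length_cons]; omega)]
  exact List.getElem_mem _

-- quickselect: 0-based k-th smallest of xs (Source B's _kth_smallest; the while loop is this
-- recursion over the same state (xs, k); k stays in range in every call B makes, so Python's
-- nonnegative ints and subtractions are Nat here; [] is unreachable)
def pvKth : List Int → Nat → Int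
  | [], _ => 0
  | x0 :: rest, k =>
    let p := (x0 :: rest).getD ((x0 :: rest).length / 2) 0
    let lt := (x0 :: rest).filter (fun x => decide (x < p))
    if k < lt.length then pvKth lt k
    else
      let eq := (x0 :: rest).countP (fun x => decide (x = p))
      if k < lt.length + eq then p
      else pvKth ((x0 :: rest).filter (fun x => decide (p < x))) (k - (lt.length + eq))
termination_by xs _ => xs.length
decreasing_by
  · rw [List.length_filter_lt_length_iff_exists]
    exact ⟨p, pvPivot_mem x0 rest, by simp only [decide_eq_true_eq]; exact lt_irrefl p⟩
  · rw [List.length_filter_lt_length_iff_exists]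
    exact ⟨p, pvPivot_mem x0 rest, by simp only [decide_eq_true_eq]; exact lt_irrefl p⟩

def minSumDistancesToWarehouses_alt (dist_centers : List Int) : Int :=
  let n := PySem.List.len dist_centers
  if n ≤ 2 then 0
  else
    -- min/max of a nonempty list (n ≥ 3 here, so the .getD defaults are unused)
    let mn := (PySem.List.min? dist_centers (fun x => x)).getD 0
    let mx := (PySem.List.max? dist_centers (fun x => x)).getD 0
    if mn = mx then 0
    else
      let t := mn + mx
      let first := dist_centers.filter (fun x => decide (2 * x < t))
      let second := dist_centers.filter (fun x => decide (t ≤ 2 * x))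
      -- len(first)//2 on a Python int len(first) ≥ 0 is Nat division
      let m1 := pvKth first (first.length / 2)
      let m2 := pvKth second (second.length / 2)
      (dist_centers.map (fun x => min |x - m1| |x - m2|)).sum

-- ===== PRECONDITION & SPEC =====
-- Pre_ excludes exactly the lists of length ≥ 3 whose elements are all equal: there A's
-- `first` group is empty and `first[len(first) // 2]` raises IndexError.
def Pre_minSumDistancesToWarehouses (dist_centers : List Int) : Prop :=
  dist_centers.length ≤ 2 ∨ ∃ x ∈ dist_centers, ∃ y ∈ dist_centers, x ≠ y
instance (dist_centers : List Int) : Decidable (Pre_minSumDistancesToWarehouses dist_centers) := by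
  unfold Pre_minSumDistancesToWarehouses; infer_instance

def pvWitness_minSumDistancesToWarehouses : List Int := [4, 0, 9, 2]

-- On lists of length ≥ 3 whose elements are all equal, A raises IndexError (its first group is
-- empty and it indexes into it); B returns 0, the cost of placing both warehouses at the common point.
def Raises_minSumDistancesToWarehouses (dist_centers : List Int) : Prop :=
  3 ≤ dist_centers.length ∧ ∀ x ∈ dist_centers, ∀ y ∈ dist_centers, x = y
instance (dist_centers : List Int) : Decidable (Raises_minSumDistancesToWarehouses dist_centers) := by
  unfold Raises_minSumDistancesToWarehouses; infer_instance
def pvRaiseWitness_minSumDistancesToWarehouses : List Int := [5, 5, 5]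
def pvRaiseWitnessOut_minSumDistancesToWarehouses : Int := 0

def Spec_minSumDistancesToWarehouses (dist_centers : List Int) (out : Int) : Prop :=
  out = minSumDistancesToWarehouses_alt dist_centers
instance (dist_centers : List Int) (out : Int) : Decidable (Spec_minSumDistancesToWarehouses dist_centers out) := by
  unfold Spec_minSumDistancesToWarehouses; infer_instance

-- ===== CLAIM (what is proved, stated in full; the proofs are below) =====
def Claim_equal_minSumDistancesToWarehouses : Prop :=
  ∀ (dist_centers : List Int), Dom_minSumDistancesToWarehouses dist_centers →
    Pre_minSumDistancesToWarehouses dist_centers →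
    Spec_minSumDistancesToWarehouses dist_centers (minSumDistancesToWarehouses dist_centers)

def Claim_raises_minSumDistancesToWarehouses : Prop :=
  (∀ (dist_centers : List Int), Dom_minSumDistancesToWarehouses dist_centers →
      Raises_minSumDistancesToWarehouses dist_centers → ¬ Pre_minSumDistancesToWarehouses dist_centers) ∧
  (Dom_minSumDistancesToWarehouses (pvRaiseWitness_minSumDistancesToWarehouses) ∧
   Raises_minSumDistancesToWarehouses (pvRaiseWitness_minSumDistancesToWarehouses) ∧
   minSumDistancesToWarehouses_alt (pvRaiseWitness_minSumDistancesToWarehouses) = pvRaiseWitnessOut_minSumDistancesToWarehouses)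

-- ===== LEMMAS AND PROOFS =====

-- the three-way pivot partition is a permutation of the list
lemma pvThreeway (p : Int) (xs : List Int) :
    (xs.filter (fun x => decide (x < p)) ++ xs.filter (fun x => decide (x = p)) ++
      xs.filter (fun x => decide (p < x))).Perm xs := by
  induction xs with
  | nil => simp
  | cons a t ih =>
    simp only [List.filter_cons]
    rcases lt_trichotomy a p with h|h|h
    · have h2 : ¬ (a = p) := ne_of_lt h
      have h3 : ¬ (p < a) := not_lt.mpr (le_of_lt h)
      simp only [h, h2, h3, decide_true, decide_false, if_true, List.cons_append]
      exact ih.cons a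
    · subst h
      simp only [decide_eq_true_eq, lt_self_iff_false, if_false, if_true]
      have he : t.filter (fun x => decide (x < a)) ++ a :: t.filter (fun x => decide (x = a)) ++
          t.filter (fun x => decide (a < x))
          = t.filter (fun x => decide (x < a)) ++ a :: (t.filter (fun x => decide (x = a)) ++
            t.filter (fun x => decide (a < x))) := by simp
      rw [he]
      refine List.perm_middle.trans (List.Perm.cons a ?_)
      simpa [List.append_assoc] using ih
    · have h1 : ¬ (a < p) := by omega
      have h2 : ¬ (a = p) := by omega
      simp only [h, h1, h2, decide_true, decide_false, if_true]
      exact List.perm_middle.trans (ih.cons a)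

-- sorting commutes with filtering
lemma pvSortedFilter (l : List Int) (c : Int → Bool) :
    PySem.List.sorted (l.filter c) (fun x => x) = (PySem.List.sorted l (fun x => x)).filter c := by
  apply PySem.List.sorted_id_eq_of_perm_of_pairwise
  · exact ((PySem.List.sorted_perm l (fun x => x) false).filter c)
  · exact (PySem.List.sorted_pairwise l (fun x => x)).filter c

-- decomposition of the sorted list around a pivot

lemma pvSortedDecomp (p : Int) (xs : List Int) :
    PySem.List.sorted xs (fun x => x)
      = PySem.List.sorted (xs.filter (fun x => decide (x < p))) (fun x => x)
        ++ xs.filter (fun x => decide (x = p))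
        ++ PySem.List.sorted (xs.filter (fun x => decide (p < x))) (fun x => x) := by
  apply PySem.List.sorted_id_eq_of_perm_of_pairwise
  · refine List.Perm.trans ?_ (pvThreeway p xs)
    exact ((PySem.List.sorted_perm (xs.filter (fun x => decide (x < p))) (fun x => x) false).append
      (List.Perm.refl (xs.filter (fun x => decide (x = p))))).append
      (PySem.List.sorted_perm (xs.filter (fun x => decide (p < x))) (fun x => x) false)
  · rw [List.pairwise_append, List.pairwise_append]
    have hmemL : ∀ x ∈ PySem.List.sorted (xs.filter (fun x => decide (x < p))) (fun x => x), x < p := by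
      intro x hx
      rw [PySem.List.mem_sorted] at hx
      simpa using (List.mem_filter.mp hx).2
    have hmemE : ∀ x ∈ xs.filter (fun x => decide (x = p)), x = p := by
      intro x hx; simpa using (List.mem_filter.mp hx).2
    have hmemG : ∀ x ∈ PySem.List.sorted (xs.filter (fun x => decide (p < x))) (fun x => x), p < x := by
      intro x hx
      rw [PySem.List.mem_sorted] at hx
      simpa using (List.mem_filter.mp hx).2
    refine ⟨⟨PySem.List.sorted_pairwise _ _, ?_, ?_⟩, PySem.List.sorted_pairwise _ _, ?_⟩
    · -- pairwise within E
      apply List.pairwise_of_forall_mem_list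
      intro a ha b hb
      rw [hmemE a ha, hmemE b hb]
    · -- sorted L vs E
      intro a ha b hb
      rw [hmemE b hb]
      exact le_of_lt (hmemL a ha)
    · -- (sorted L ++ E) vs sorted G
      intro a ha b hb
      rcases List.mem_append.mp ha with h|h
      · exact le_of_lt (lt_trans (hmemL a h) (hmemG b hb))
      · rw [hmemE a h]; exact le_of_lt (hmemG b hb)

lemma pvKth_sorted (fuel : Nat) : ∀ (xs : List Int) (k : Nat), xs.length ≤ fuel → k < xs.length →
    pvKth xs k = (PySem.List.sorted xs (fun x => x)).getD k 0 := by
  induction fuel with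
  | zero => intro xs k h hk; omega
  | succ m ih =>
    intro xs k h hk
    match xs with
    | [] => simp at hk
    | x0 :: rest =>
      set q := (x0 :: rest).getD ((x0 :: rest).length / 2) 0 with hq
      have hqmem : q ∈ x0 :: rest := pvPivot_mem x0 rest
      set L := (x0 :: rest).filter (fun x => decide (x < q)) with hL
      set E := (x0 :: rest).filter (fun x => decide (x = q)) with hE
      set G := (x0 :: rest).filter (fun x => decide (q < x)) with hG
      have hLlen : L.length ≤ m := by
        have : L.length < (x0 :: rest).length := by
          rw [hL, List.length_filter_lt_length_iff_exists]
          exact ⟨q, hqmem, by simp⟩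
        omega
      have hGlen : G.length ≤ m := by
        have : G.length < (x0 :: rest).length := by
          rw [hG, List.length_filter_lt_length_iff_exists]
          exact ⟨q, hqmem, by simp⟩
        omega
      have hperm := pvThreeway q (x0 :: rest)
      have hlen : (x0 :: rest).length = L.length + E.length + G.length := by
        have := hperm.length_eq
        rw [← hL, ← hE, ← hG] at this
        simp only [List.length_append] at this
        omega
      have hcount : (x0 :: rest).countP (fun x => decide (x = q)) = E.length := by
        rw [hE]; exact List.countP_eq_length_filter
      have hdecomp := pvSortedDecomp q (x0 :: rest)
      have hLs : (PySem.List.sorted L (fun x => x)).length = L.length :=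
        PySem.List.length_sorted _ _ _
      have hEall : ∀ x ∈ E, x = q := by
        intro x hx; rw [hE] at hx; simpa using (List.mem_filter.mp hx).2
      rw [pvKth]
      simp only [← hq, ← hL, ← hG, hcount]
      by_cases h1 : k < L.length
      · rw [if_pos h1, hdecomp, List.append_assoc,
          List.getD_append _ _ _ _ (by rw [hLs]; omega : k < (PySem.List.sorted L (fun x => x)).length)]
        exact ih L k hLlen h1
      · rw [if_neg h1]
        by_cases h2 : k < L.length + E.length
        · rw [if_pos h2, hdecomp, List.append_assoc,
            List.getD_append_right _ _ _ _ (by rw [hLs]; omega : (PySem.List.sorted L (fun x => x)).length ≤ k),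
            List.getD_append _ _ _ _ (by rw [hLs]; omega : k - (PySem.List.sorted L (fun x => x)).length < E.length)]
          have hin : k - (PySem.List.sorted L (fun x => x)).length < E.length := by rw [hLs]; omega
          rw [List.getD_eq_getElem _ _ hin]
          exact (hEall _ (List.getElem_mem hin)).symm
        · rw [if_neg h2, hdecomp, List.append_assoc,
            List.getD_append_right _ _ _ _ (by rw [hLs]; omega : (PySem.List.sorted L (fun x => x)).length ≤ k),
            List.getD_append_right _ _ _ _ (by rw [hLs]; omega : E.length ≤ k - (PySem.List.sorted L (fun x => x)).length)]
          have hkG : k - (L.length + E.length) < G.length := by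
            have hk2 : k < L.length + E.length + G.length := by rw [← hlen]; exact hk
            omega
          rw [ih G (k - (L.length + E.length)) hGlen hkG]
          congr 1
          rw [hLs]
          omega

-- A's grouping loop appends each element to exactly one side
lemma pvPairFold (P : Int → Prop) [DecidablePred P] :
    ∀ (s : List Int) (a b : List Int),
      s.foldl (fun (acc : List Int × List Int) x =>
          if P x then (acc.1 ++ [x], acc.2) else (acc.1, acc.2 ++ [x])) (a, b)
        = (a ++ s.filter (fun x => decide (P x)), b ++ s.filter (fun x => !decide (P x))) := by
  intro s
  induction s with
  | nil => intro a b; simp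
  | cons x t ih =>
    intro a b
    by_cases h : P x <;> simp [h, ih, List.append_assoc]

-- a loop 'for i in range(len(s))' reading s[i] is a fold over s
lemma pvFoldIdx {β : Type} (s : List Int) (g : β → Int → β) (init : β) :
    (PySem.List.pyRange 0 (s.length : Int) 1).foldl
        (fun acc i => g acc (PySem.List.pyGetD s i 0)) init
      = s.foldl g init := by
  have h := PySem.List.map_pyGetD_pyRange_zero s 0
  rw [PySem.List.len_eq] at h
  conv_rhs => rw [← h]
  rw [List.foldl_map]

-- A's grouping loop, in closed form
lemma pvFoldGroups (s : List Int) (mv Mv : Int) :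
    (PySem.List.pyRange 0 (s.length : Int) 1).foldl (fun (acc : List Int × List Int) i =>
        if |PySem.List.pyGetD s i 0 - mv| < |PySem.List.pyGetD s i 0 - Mv| then
          (acc.1 ++ [PySem.List.pyGetD s i 0], acc.2)
        else (acc.1, acc.2 ++ [PySem.List.pyGetD s i 0])) ([], [])
      = (s.filter (fun x => decide (|x - mv| < |x - Mv|)),
         s.filter (fun x => !decide (|x - mv| < |x - Mv|))) := by
  refine (pvFoldIdx s (fun acc x =>
      if |x - mv| < |x - Mv| then (acc.1 ++ [x], acc.2) else (acc.1, acc.2 ++ [x])) ([], [])).trans ?_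
  simpa using pvPairFold (fun x => |x - mv| < |x - Mv|) s [] []

-- A's distance-sum loop, in closed form
lemma pvFoldSum (s : List Int) (m1 m2 : Int) :
    (PySem.List.pyRange 0 (s.length : Int) 1).foldl (fun res i =>
        res + min |PySem.List.pyGetD s i 0 - m1| |PySem.List.pyGetD s i 0 - m2|) 0
      = (s.map (fun x => min |x - m1| |x - m2|)).sum := by
  refine (pvFoldIdx s (fun res x => res + min |x - m1| |x - m2|) 0).trans ?_
  simpa using PySem.List.foldl_add s (fun x => min |x - m1| |x - m2|) 0

-- ===== VERDICT (by name: the statement is the Claim_ definition above) =====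
theorem minSumDistancesToWarehouses_spec : Claim_equal_minSumDistancesToWarehouses := by
  intro l _ hpre
  unfold Spec_minSumDistancesToWarehouses
  by_cases hn : l.length ≤ 2
  · have hn' : (l.length : Int) ≤ 2 := by exact_mod_cast hn
    simp only [minSumDistancesToWarehouses, minSumDistancesToWarehouses_alt,
      PySem.List.len_eq, if_pos hn']
  · -- length ≥ 3, and Pre_ gives two distinct elements
    have hn3 : 3 ≤ l.length := by omega
    have hn' : ¬ ((l.length : Int) ≤ 2) := by exact_mod_cast hn
    obtain ⟨x, hx, y, hy, hxy⟩ : ∃ x ∈ l, ∃ y ∈ l, x ≠ y := by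
      rcases hpre with h | h
      · omega
      · exact h
    have hlne : l ≠ [] := by intro h; rw [h] at hn3; simp at hn3
    -- min and max
    obtain ⟨m, hm⟩ : ∃ m, PySem.List.min? l (fun x => x) = some m := by
      cases h : PySem.List.min? l (fun x => x) with
      | none => exact absurd ((PySem.List.min?_eq_none_iff l (fun x => x)).mp h) hlne
      | some m => exact ⟨m, rfl⟩
    obtain ⟨M, hM⟩ : ∃ M, PySem.List.max? l (fun x => x) = some M := by
      cases h : PySem.List.max? l (fun x => x) with
      | none => exact absurd ((PySem.List.max?_eq_none_iff l (fun x => x)).mp h) hlne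
      | some M => exact ⟨M, rfl⟩
    have hmlo : ∀ z ∈ l, m ≤ z := PySem.List.min?_isMin hm
    have hMhi : ∀ z ∈ l, z ≤ M := PySem.List.max?_isMax hM
    have hmmem : m ∈ l := PySem.List.min?_mem hm
    have hMmem : M ∈ l := PySem.List.max?_mem hM
    have hmM : m < M := by
      have h1 := hmlo x hx; have h2 := hMhi x hx
      have h3 := hmlo y hy; have h4 := hMhi y hy
      omega
    -- the sorted list
    set s := PySem.List.sorted l (fun x => x) with hs
    have hsperm : s.Perm l := PySem.List.sorted_perm l (fun x => x) false
    have hsmem : ∀ z, z ∈ s ↔ z ∈ l := fun z => PySem.List.mem_sorted l (fun x => x) false z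
    have hslen : s.length = l.length := hsperm.length_eq
    have hsne : s ≠ [] := by
      intro h; rw [h] at hslen; simp at hslen; omega
    -- s[0] is the minimum
    have hhead : PySem.List.pyGetD s 0 0 = m := by
      obtain ⟨s0, st, h0⟩ := List.exists_cons_of_ne_nil hsne
      have h0' : PySem.List.sorted l (fun x => x) = s0 :: st := by rw [← hs]; exact h0
      rw [h0, PySem.List.pyGetD_zero_cons]
      have h1 : s0 ≤ m := PySem.List.key_head_sorted_le l (fun x => x) h0' m hmmem
      have h2 : m ≤ s0 := hmlo s0 ((hsmem s0).mp (h0 ▸ List.mem_cons_self))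
      omega
    -- s[-1] is the maximum
    have hlast : PySem.List.pyGetD s (-1) 0 = M := by
      rw [PySem.List.pyGetD_neg_ofNat s 1 0 (by omega) (by omega)]
      have h1 : s[s.length - 1] ≤ M := hMhi _ ((hsmem _).mp (List.getElem_mem (by omega)))
      obtain ⟨j, hj, hMj⟩ := List.mem_iff_getElem.mp ((hsmem M).mpr hMmem)
      have h2 : M ≤ s[s.length - 1] := by
        calc M = s[j] := hMj.symm
          _ ≤ s[s.length - 1] := PySem.List.sorted_id_getElem_mono l (by omega) (by rw [← hs]; omega)
      omega
    -- the two groups are filters of the sorted list, i.e. sorted filters of l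
    have habs : ∀ z ∈ s, (decide (|z - m| < |z - M|)) = (decide (2 * z < m + M)) := by
      intro z hz
      have h1 := hmlo z ((hsmem z).mp hz)
      have h2 := hMhi z ((hsmem z).mp hz)
      rw [decide_eq_decide, abs_of_nonneg (by omega : (0:Int) ≤ z - m),
        abs_of_nonpos (by omega : z - M ≤ (0:Int))]
      omega
    have habs' : ∀ z ∈ s, (!decide (|z - m| < |z - M|)) = (decide (m + M ≤ 2 * z)) := by
      intro z hz
      rw [habs z hz, ← decide_not, decide_eq_decide]
      omega
    have hF1 : s.filter (fun z => decide (|z - m| < |z - M|))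
        = PySem.List.sorted (l.filter (fun z => decide (2 * z < m + M))) (fun x => x) := by
      rw [List.filter_congr habs, pvSortedFilter, ← hs]
    have hF2 : s.filter (fun z => !decide (|z - m| < |z - M|))
        = PySem.List.sorted (l.filter (fun z => decide (m + M ≤ 2 * z))) (fun x => x) := by
      rw [List.filter_congr habs', pvSortedFilter, ← hs]
    set f1 := l.filter (fun z => decide (2 * z < m + M)) with hf1
    set f2 := l.filter (fun z => decide (m + M ≤ 2 * z)) with hf2
    have hf1ne : 0 < f1.length := by
      have : m ∈ f1 := by rw [hf1]; exact List.mem_filter.mpr ⟨hmmem, by simp; omega⟩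
      exact List.length_pos_of_mem this
    have hf2ne : 0 < f2.length := by
      have : M ∈ f2 := by rw [hf2]; exact List.mem_filter.mpr ⟨hMmem, by simp; omega⟩
      exact List.length_pos_of_mem this
    -- the medians agree: A indexes the sorted group, B quickselects it
    have hmed1 : PySem.List.pyGetD (PySem.List.sorted f1 (fun x => x))
        (PySem.Int.floordiv (((PySem.List.sorted f1 (fun x => x)).length : Int)) 2) 0
        = pvKth f1 (f1.length / 2) := by
      rw [PySem.List.length_sorted,
        (by exact_mod_cast PySem.Int.floordiv_natCast f1.length 2 :
          PySem.Int.floordiv (f1.length : Int) 2 = ((f1.length / 2 : Nat) : Int)),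
        PySem.List.pyGetD_natCast, pvKth_sorted f1.length f1 (f1.length / 2) le_rfl (by omega)]
    have hmed2 : PySem.List.pyGetD (PySem.List.sorted f2 (fun x => x))
        (PySem.Int.floordiv (((PySem.List.sorted f2 (fun x => x)).length : Int)) 2) 0
        = pvKth f2 (f2.length / 2) := by
      rw [PySem.List.length_sorted,
        (by exact_mod_cast PySem.Int.floordiv_natCast f2.length 2 :
          PySem.Int.floordiv (f2.length : Int) 2 = ((f2.length / 2 : Nat) : Int)),
        PySem.List.pyGetD_natCast, pvKth_sorted f2.length f2 (f2.length / 2) le_rfl (by omega)]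
    -- now unfold both ports and rewrite
    simp only [minSumDistancesToWarehouses, minSumDistancesToWarehouses_alt, PySem.List.len_eq,
      if_neg hn', ← hs, hm, hM, Option.getD_some, if_neg (by omega : ¬ m = M),
      hhead, hlast, pvFoldGroups, hF1, hF2, ← hf1, ← hf2, hmed1, hmed2, pvFoldSum]
    exact List.Perm.sum_eq (hsperm.map _)


@[simp] theorem minSumDistancesToWarehouses_raises : Claim_raises_minSumDistancesToWarehouses := by
  unfold Claim_raises_minSumDistancesToWarehouses
  constructor
  · intro l _ hr
    obtain ⟨h3, hall⟩ := hr
    unfold Pre_minSumDistancesToWarehouses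
    push Not
    exact ⟨by omega, fun x hx y hy => hall x hx y hy⟩
  · exact ⟨by decide, by decide, by decide⟩
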